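-- pv_equiv track=rewrite | github.com/jacobdcl/python_practice | class_notes_3300/3300notes.py | tenthword
-- ===== SOURCE A (Python) =====
-- def tenthword(sentence):
--     tenth = ""
--     spaces = 0
--     for ch in sentence:
--         if ch == " ":
--             spaces += 1
--         if spaces == 9:
--             if ch != " ":
--                 tenth += ch
--     if spaces <= 9:
--         return tenth
--     else:
--         return "Not enough words!"
-- ===== SOURCE B (Python) =====
-- def tenthword(sentence):
--     words = sentence.split(" ")
--     if len(words) > 10:
--         return "Not enough words!"
--     elif len(words) == 10:
--         return words[9]
--     else:
--         return ""
-- ===== Notes on version B (the rewrite author's own statement) =====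
-- stated objective: idiomatic
-- what changed: replaces the character-by-character space-counting scan with a single split on the space delimiter and a three-way branch on the resulting word count
import Mathlib
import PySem

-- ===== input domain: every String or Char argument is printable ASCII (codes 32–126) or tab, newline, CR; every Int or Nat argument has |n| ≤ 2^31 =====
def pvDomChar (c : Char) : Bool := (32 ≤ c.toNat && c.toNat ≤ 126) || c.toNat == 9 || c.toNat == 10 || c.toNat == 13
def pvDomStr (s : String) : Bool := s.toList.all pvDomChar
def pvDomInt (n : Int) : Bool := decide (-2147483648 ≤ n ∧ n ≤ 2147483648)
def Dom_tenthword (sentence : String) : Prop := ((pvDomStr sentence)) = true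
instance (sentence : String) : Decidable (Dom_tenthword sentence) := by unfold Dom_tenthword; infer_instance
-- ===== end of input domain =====

-- B replaces A's character-by-character space-counting scan with split(" ") plus a branch on the word count; a timing run measured B faster (C-level split vs a Python-level loop).


-- ===== PORT A =====
def tenthword (sentence : String) : String :=
  let st := sentence.toList.foldl (fun (p : List Char × Int) ch =>
    let spaces := if ch = ' ' then p.2 + 1 else p.2
    let tenth := if spaces = 9 ∧ ch ≠ ' ' then p.1 ++ [ch] else p.1
    (tenth, spaces)) ([], 0)
  if st.2 ≤ 9 then String.ofList st.1 else "Not enough words!"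

-- ===== PORT B =====
def tenthword_alt (sentence : String) : String :=
  let words := PySem.Chars.splitOn sentence.toList [' ']
  if words.length > 10 then "Not enough words!"
  else if words.length = 10 then String.ofList ((PySem.List.pyGet? words 9).getD [])
  else ""

-- ===== PRECONDITION & SPEC =====
def Spec_tenthword (sentence : String) (out : String) : Prop := out = tenthword_alt sentence
instance (sentence : String) (out : String) : Decidable (Spec_tenthword sentence out) := by unfold Spec_tenthword; infer_instance

-- ===== CLAIM (what is proved, stated in full; the proofs are below) =====
def Claim_equal_tenthword : Prop := ∀ (sentence : String), Dom_tenthword sentence → Spec_tenthword sentence (tenthword sentence)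

-- ===== LEMMAS AND PROOFS =====

-- simple structural split at single spaces, used to characterise both ports
def splitSp (cur : List Char) : List Char → List (List Char)
  | [] => [cur]
  | c :: r => if c = ' ' then cur :: splitSp [] r else splitSp (cur ++ [c]) r

-- the characters A's scan appends starting from a given space count
def pick (sp : Int) : List Char → List Char
  | [] => []
  | c :: r =>
    let sp' := if c = ' ' then sp + 1 else sp
    (if sp' = 9 ∧ c ≠ ' ' then [c] else []) ++ pick sp' r

theorem splitOn_go_eq (fuel : Nat) : ∀ (l cur : List Char) (acc : List (List Char)) (_ : l.length < fuel),
    PySem.Chars.splitOn.go [' '] fuel l cur acc = acc.reverse ++ splitSp cur.reverse l := by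
  induction fuel with
  | zero => intro l cur acc h; omega
  | succ f ih =>
    intro l cur acc h
    cases l with
    | nil => simp [PySem.Chars.splitOn.go, splitSp]
    | cons c r =>
      have hr : r.length < f := by simp at h; omega
      by_cases hc : c = ' '
      · subst hc
        rw [PySem.Chars.splitOn.go]
        rw [if_pos (by simp)]
        rw [show List.drop [' '].length (' ' :: r) = r from rfl]
        rw [ih r [] (cur.reverse :: acc) hr]
        simp [splitSp]
      · rw [PySem.Chars.splitOn.go]
        rw [if_neg (by simp; exact fun hsp => hc hsp.symm)]
        rw [ih r (c :: cur) acc hr]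
        simp [splitSp, hc]

theorem foldA_eq (l : List Char) : ∀ (t : List Char) (sp : Int),
    l.foldl (fun (p : List Char × Int) ch =>
      let spaces := if ch = ' ' then p.2 + 1 else p.2
      let tenth := if spaces = 9 ∧ ch ≠ ' ' then p.1 ++ [ch] else p.1
      (tenth, spaces)) (t, sp) = (t ++ pick sp l, sp + (l.count ' ' : Int)) := by
  induction l with
  | nil => intro t sp; simp [pick]
  | cons c r ih =>
    intro t sp
    simp only [List.foldl_cons, ih, pick, List.count_cons]
    by_cases hc : c = ' ' <;> simp [hc] <;> first | omega | (split_ifs <;> simp)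

theorem pick_ge10 (l : List Char) : ∀ (sp : Int), 10 ≤ sp → pick sp l = [] := by
  induction l with
  | nil => intro sp _; rfl
  | cons c r ih =>
    intro sp h
    have h1 : ¬((if c = ' ' then sp + 1 else sp) = 9 ∧ c ≠ ' ') := by
      rintro ⟨h2, -⟩
      split at h2 <;> omega
    have h2 : 10 ≤ (if c = ' ' then sp + 1 else sp) := by split <;> omega
    simp [pick, h1, ih _ h2]

theorem pick_nine (l : List Char) : pick 9 l = l.takeWhile (· ≠ ' ') := by
  induction l with
  | nil => rfl
  | cons c r ih =>
    by_cases hc : c = ' '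
    · simp [pick, hc, pick_ge10 r 10 (by omega), List.takeWhile]
    · simp [pick, hc, ih, List.takeWhile]

theorem splitSp_head (l : List Char) : ∀ (cur : List Char),
    (splitSp cur l)[0]? = some (cur ++ l.takeWhile (· ≠ ' ')) := by
  induction l with
  | nil => intro cur; simp [splitSp]
  | cons c r ih =>
    intro cur
    by_cases hc : c = ' '
    · simp [splitSp, hc, List.takeWhile]
    · simp [splitSp, hc, ih, List.takeWhile]

theorem pick_eq_word (l : List Char) : ∀ (n : Nat) (cur : List Char), n < 9 →
    pick (n : Int) l = ((splitSp cur l)[9 - n]?).getD [] := by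
  induction l with
  | nil =>
    intro n cur h
    have hidx : 9 - n = (8 - n) + 1 := by omega
    simp [pick, splitSp, hidx]
  | cons c r ih =>
    intro n cur h
    by_cases hc : c = ' '
    · have hidx : 9 - n = (8 - n) + 1 := by omega
      by_cases h8 : n + 1 < 9
      · have := ih (n + 1) [] h8
        push_cast at this
        simp only [pick, splitSp, hc, hidx]
        rw [(by omega : 8 - n = 9 - (n + 1))]
        simpa using this
      · have hn : n = 8 := by omega
        subst hn
        simp [pick, splitSp, hc, hidx, pick_nine, splitSp_head]
    · simp [pick, splitSp, hc, ih n (cur ++ [c]) h]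
      omega

theorem splitSp_length (l : List Char) : ∀ (cur : List Char),
    (splitSp cur l).length = l.count ' ' + 1 := by
  induction l with
  | nil => intro cur; rfl
  | cons c r ih =>
    intro cur
    by_cases hc : c = ' ' <;> simp [splitSp, hc, ih]

-- ===== VERDICT (by name: the statement is the Claim_ definition above) =====
theorem tenthword_spec : Claim_equal_tenthword := by
  intro sentence _
  unfold Spec_tenthword tenthword tenthword_alt
  have hgo : PySem.Chars.splitOn sentence.toList [' '] = splitSp [] sentence.toList := by
    unfold PySem.Chars.splitOn
    simpa using splitOn_go_eq (sentence.toList.length + 1) sentence.toList [] [] (by omega)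
  simp only [hgo, foldA_eq sentence.toList [] 0, List.nil_append, zero_add,
    splitSp_length sentence.toList []]
  have hpick : pick 0 sentence.toList = ((splitSp [] sentence.toList)[9]?).getD [] := by
    simpa using pick_eq_word sentence.toList 0 [] (by omega)
  by_cases h9 : (sentence.toList.count ' ' : Int) ≤ 9
  · have hle : sentence.toList.count ' ' ≤ 9 := by exact_mod_cast h9
    rw [if_pos h9, if_neg (by omega)]
    by_cases heq : sentence.toList.count ' ' = 9
    · rw [if_pos (by omega)]
      have hlen : (splitSp [] sentence.toList).length = 10 := by
        rw [splitSp_length sentence.toList [], heq]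
      rw [hpick]
      congr 1
      simp [PySem.List.pyGet?, PySem.List.pyIdx?, hlen]
    · rw [if_neg (by omega), hpick]
      have : (splitSp [] sentence.toList)[9]? = none := by
        apply List.getElem?_eq_none
        rw [splitSp_length sentence.toList []]
        omega
      simp [this]
  · rw [if_neg h9, if_pos (by omega : sentence.toList.count ' ' + 1 > 10)]
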